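-- pv_equiv track=rewrite | github.com/Nevoada10/Python | 06 - LeetCodeProblems/msatest.py | extract_non_descending_sublist
-- ===== SOURCE A (Python) =====
-- def extract_non_descending_sublist(random_list):
--     """
--     Extracts the longest non-descending sublist from the start of the given list.
--
--     Args:
--         random_list (list): The list from which to extract the sublist.
--
--     Returns:
--         list: The longest non-descending sublist.
--     """
--     if not random_list:
--         return []
--
--     sublist = [random_list[0]]
--     for i in range(1, len(random_list)):
--         if random_list[i-1] <= random_list[i]:
--             sublist.append(random_list[i])
--         else:
--             break
--     return sublist
-- ===== SOURCE B (Python) =====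
-- def extract_non_descending_sublist(random_list):
--     end = next((i for i in range(1, len(random_list))
--                 if not (random_list[i - 1] <= random_list[i])),
--                len(random_list))
--     return random_list[:end]
-- ===== Notes on version B (the rewrite author's own statement) =====
-- stated objective: idiomatic
-- what changed: B first computes the index of the first descent (next over a generator, defaulting to len) and then slices once, instead of appending element by element inside a loop with break.
import Mathlib
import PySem

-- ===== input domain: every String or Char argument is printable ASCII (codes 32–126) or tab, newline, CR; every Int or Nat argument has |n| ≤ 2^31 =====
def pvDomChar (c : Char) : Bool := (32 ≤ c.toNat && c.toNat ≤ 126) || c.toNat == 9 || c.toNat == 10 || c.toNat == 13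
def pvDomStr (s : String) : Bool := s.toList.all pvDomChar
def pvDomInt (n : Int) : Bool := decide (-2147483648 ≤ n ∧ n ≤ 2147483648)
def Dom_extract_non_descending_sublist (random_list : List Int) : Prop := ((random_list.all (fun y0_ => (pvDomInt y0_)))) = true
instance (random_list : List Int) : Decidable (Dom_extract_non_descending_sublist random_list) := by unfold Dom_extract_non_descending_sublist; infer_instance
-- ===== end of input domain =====

-- B computes the index of the first descent and slices once, instead of appending inside a loop with break (idiomatic decomposition; same cost).


-- ===== PORT A =====
-- A's for-loop over i in range(1, len): at each step it compares the previous
-- element with the current one, appends on ≤ and breaks otherwise; ported as a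
-- structural recursion carrying the previous element.
def pvALoop : Int → List Int → List Int
  | _, [] => []
  | prev, c :: rest => if prev ≤ c then c :: pvALoop c rest else []

def extract_non_descending_sublist (random_list : List Int) : List Int :=
  match random_list with
  | [] => []                       -- if not random_list: return []
  | h :: t => h :: pvALoop h t     -- sublist = [random_list[0]]; then the loop

-- ===== PORT B =====
-- B's generator scans indices 1..len-1 looking at the consecutive pair
-- (l[i-1], l[i]); `next(…, len)` defaults to the length. Ported as a scan over
-- consecutive pairs returning the index of the first descent (or the length).
def pvBEnd : List Int → Nat
  | [] => 0
  | [_] => 1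
  | a :: b :: rest => if ¬ (a ≤ b) then 1 else 1 + pvBEnd (b :: rest)

def extract_non_descending_sublist_alt (random_list : List Int) : List Int :=
  PySem.List.slice random_list none (some ((pvBEnd random_list : Nat) : Int))  -- random_list[:end]

-- ===== PRECONDITION & SPEC =====
def Spec_extract_non_descending_sublist (random_list : List Int) (out : List Int) : Prop := out = extract_non_descending_sublist_alt random_list
instance (random_list : List Int) (out : List Int) : Decidable (Spec_extract_non_descending_sublist random_list out) := by unfold Spec_extract_non_descending_sublist; infer_instance

-- ===== CLAIM (what is proved, stated in full; the proofs are below) =====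
def Claim_equal_extract_non_descending_sublist : Prop := ∀ (random_list : List Int), Dom_extract_non_descending_sublist random_list → Spec_extract_non_descending_sublist random_list (extract_non_descending_sublist random_list)

-- ===== LEMMAS AND PROOFS =====
lemma pvALoop_eq_take (t : List Int) : ∀ h : Int,
    h :: pvALoop h t = List.take (pvBEnd (h :: t)) (h :: t) := by
  induction t with
  | nil => intro h; simp [pvALoop, pvBEnd]
  | cons b t' ih =>
    intro h
    by_cases hle : h ≤ b
    · simp only [pvALoop, pvBEnd, hle, not_true_eq_false, ite_true, ite_false]
      rw [Nat.add_comm, List.take_succ_cons]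
      exact congrArg (h :: ·) (ih b)
    · simp [pvALoop, pvBEnd, hle]

-- ===== VERDICT (by name: the statement is the Claim_ definition above) =====
theorem extract_non_descending_sublist_spec : Claim_equal_extract_non_descending_sublist := by
  intro l _
  unfold Spec_extract_non_descending_sublist extract_non_descending_sublist extract_non_descending_sublist_alt
  cases l with
  | nil => simp [pvBEnd, PySem.List.slice]
  | cons h t => rw [PySem.List.slice_to_natCast]; exact pvALoop_eq_take t h
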